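-- pv_equiv track=rewrite | github.com/ycmin95/Chalearn_2022_Sign_Spotting_MSSL_track | evaluator/evaluator.py | generate_labels_start_end_time
-- ===== SOURCE A (Python) =====
-- def generate_labels_start_end_time(framewise_labels, bg_class=['background']):
--     labels = []
--     starts = []
--     ends = []
--     last_label = framewise_labels[0]
--     if framewise_labels[0] not in bg_class:
--         labels.append(framewise_labels[0])
--         starts.append(0)
--     for i in range(len(framewise_labels)):
--         if framewise_labels[i] != last_label:
--             if framewise_labels[i] not in bg_class:
--                 labels.append(framewise_labels[i])
--                 starts.append(i)
--             if last_label not in bg_class: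
--                 ends.append(i - 1)
--             last_label = framewise_labels[i]
--     if last_label not in bg_class:
--         ends.append(i)
--     for idx in range(len(labels)):
--         labels[idx] = int(labels[idx]) - 1
--     return labels, starts, ends
-- ===== SOURCE B (Python) =====
-- def generate_labels_start_end_time(framewise_labels, bg_class=['background']):
--     n = len(framewise_labels)
--     marks = [(i, framewise_labels[i]) for i in range(n)
--              if i == 0 or framewise_labels[i] != framewise_labels[i - 1]]
--     run_ends = [i - 1 for i, _ in marks[1:]] + [n - 1] if marks else []
--     labels, starts, ends = [], [], []
--     for (s, lab), e in zip(marks, run_ends):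
--         if lab not in bg_class:
--             labels.append(int(lab) - 1)
--             starts.append(s)
--             ends.append(e)
--     return labels, starts, ends
-- ===== Notes on version B (the rewrite author's own statement) =====
-- stated objective: alternative
-- what changed: Replaces A's online state machine (last_label tracking with conditional appends at each transition, a leftover loop index closing the final run, and a second in-place decode pass) by a staged offline pipeline: first a comprehension collects the change-point marks (index, label), then run ends are derived arithmetically by shifting the mark indices, and finally one zip over (mark, end) pairs filters background runs and decodes labels.
import Mathlib
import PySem

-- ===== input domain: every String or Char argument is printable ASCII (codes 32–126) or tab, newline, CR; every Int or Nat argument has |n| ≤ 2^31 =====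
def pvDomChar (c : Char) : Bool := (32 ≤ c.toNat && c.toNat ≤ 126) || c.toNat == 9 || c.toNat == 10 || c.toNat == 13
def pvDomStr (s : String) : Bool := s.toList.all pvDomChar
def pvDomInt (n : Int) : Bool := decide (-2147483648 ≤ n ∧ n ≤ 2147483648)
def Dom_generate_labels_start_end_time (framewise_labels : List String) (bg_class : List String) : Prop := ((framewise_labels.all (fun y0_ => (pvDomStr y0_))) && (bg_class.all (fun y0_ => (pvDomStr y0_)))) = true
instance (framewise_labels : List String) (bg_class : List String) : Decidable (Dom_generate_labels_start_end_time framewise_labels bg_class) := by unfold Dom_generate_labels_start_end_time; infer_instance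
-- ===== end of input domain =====

-- B replaces A's online state machine by a staged pipeline: collect change-point marks,
-- derive run ends by shifting the mark indices, then filter/decode over a zip
-- (objective: alternative); return value only, no side effects.

-- ===== PORT A =====
-- the for-loop of A: state (labels as strings, starts, ends, last_label), index i over the frames
def pvALoop (xs : List String) (bg : List String) (i : Int)
    (labels : List String) (starts ends : List Int) (last : String) :
    List String × List Int × List Int × String :=
  match xs with
  | [] => (labels, starts, ends, last)
  | x :: rest =>
    if x ≠ last then
      let labels' := if x ∈ bg then labels else labels ++ [x]
      let starts' := if x ∈ bg then starts else starts ++ [i]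
      let ends' := if last ∈ bg then ends else ends ++ [i - 1]
      pvALoop rest bg (i + 1) labels' starts' ends' x
    else
      pvALoop rest bg (i + 1) labels starts ends last

def generate_labels_start_end_time (framewise_labels : List String) (bg_class : List String) : List Int × List Int × List Int :=
  -- framewise_labels[0]: IndexError on [] is excluded by Pre_; headD "" stands in for it
  let first := framewise_labels.headD ""
  let labels0 : List String := if first ∈ bg_class then [] else [first]
  let starts0 : List Int := if first ∈ bg_class then [] else [0]
  let r := pvALoop framewise_labels bg_class 0 labels0 starts0 [] first
  -- after the loop, i = len - 1 (Pre_ guarantees the loop ran at least once)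
  let ends := if r.2.2.2 ∈ bg_class then r.2.2.1 else r.2.2.1 ++ [(framewise_labels.length : Int) - 1]
  -- second pass: labels[idx] = int(labels[idx]) - 1 (int() succeeds under Pre_; getD 0 stands in for ValueError)
  (r.1.map (fun s => (PySem.Int.ofStr? s).getD 0 - 1), r.2.1, ends)

-- ===== PORT B =====
-- stage 1: the comprehension [(i, fw[i]) for i in range(n) if i == 0 or fw[i] != fw[i-1]]
-- (filter over range(n), then pair each kept index with its element; indices are in range,
-- so pyGetD with default "" is exact)
def pvMarks (fw : List String) : List (Int × String) :=
  ((PySem.List.pyRange 0 (fw.length : Int) 1).filter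
      (fun i => i == 0 || !(PySem.List.pyGetD fw i "" == PySem.List.pyGetD fw (i - 1) ""))).map
    (fun i => (i, PySem.List.pyGetD fw i ""))

-- stage 3: the for-loop over zip(marks, run_ends), appending per non-background run
def pvEmitMarks (bg : List String) (rs : List ((Int × String) × Int)) :
    List Int × List Int × List Int :=
  match rs with
  | [] => ([], [], [])
  | ((s, lab), e) :: rest =>
    let r := pvEmitMarks bg rest
    if lab ∈ bg then r
    else (((PySem.Int.ofStr? lab).getD 0 - 1) :: r.1, s :: r.2.1, e :: r.2.2)

def generate_labels_start_end_time_alt (framewise_labels : List String) (bg_class : List String) : List Int × List Int × List Int :=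
  let marks := pvMarks framewise_labels
  -- stage 2: run_ends = [i - 1 for i, _ in marks[1:]] + [n - 1] if marks else []
  let run_ends : List Int :=
    if marks ≠ [] then
      (PySem.List.slice marks (some 1) none).map (fun p => p.1 - 1) ++
        [(framewise_labels.length : Int) - 1]
    else []
  pvEmitMarks bg_class (marks.zip run_ends)

-- ===== PRECONDITION & SPEC =====
-- Pre_: exactly where Python A returns: a nonempty list (else IndexError on framewise_labels[0])
-- whose non-background entries all parse as ints (else ValueError in int(labels[idx])).
def Pre_generate_labels_start_end_time (framewise_labels : List String) (bg_class : List String) : Prop :=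
  framewise_labels ≠ [] ∧ ∀ s ∈ framewise_labels, s ∉ bg_class → (PySem.Int.ofStr? s).isSome
instance (framewise_labels : List String) (bg_class : List String) : Decidable (Pre_generate_labels_start_end_time framewise_labels bg_class) := by unfold Pre_generate_labels_start_end_time; infer_instance

def pvWitness_generate_labels_start_end_time : List String × List String :=
  (["1", "background", "2", "2"], ["background"])

def Spec_generate_labels_start_end_time (framewise_labels : List String) (bg_class : List String) (out : List Int × List Int × List Int) : Prop := out = generate_labels_start_end_time_alt framewise_labels bg_class
instance (framewise_labels : List String) (bg_class : List String) (out : List Int × List Int × List Int) : Decidable (Spec_generate_labels_start_end_time framewise_labels bg_class out) := by unfold Spec_generate_labels_start_end_time; infer_instance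

-- ===== CLAIM (what is proved, stated in full; the proofs are below) =====
def Claim_equal_generate_labels_start_end_time : Prop := ∀ (framewise_labels : List String) (bg_class : List String), Dom_generate_labels_start_end_time framewise_labels bg_class → Pre_generate_labels_start_end_time framewise_labels bg_class → Spec_generate_labels_start_end_time framewise_labels bg_class (generate_labels_start_end_time framewise_labels bg_class)


-- ===== LEMMAS AND PROOFS =====

-- "pending run" view of A's loop: its contribution beyond the accumulators
def pvPend (xs : List String) (bg : List String) (last : String) (i : Int) :
    List String × List Int × List Int × String :=
  match xs with
  | [] => ([], [], [], last)
  | x :: rest =>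
    if x ≠ last then
      let r := pvPend rest bg x (i + 1)
      ((if x ∈ bg then r.1 else x :: r.1),
       (if x ∈ bg then r.2.1 else i :: r.2.1),
       (if last ∈ bg then r.2.2.1 else (i - 1) :: r.2.2.1),
       r.2.2.2)
    else
      pvPend rest bg last (i + 1)

theorem pvALoop_eq_pend (xs : List String) (bg : List String) :
    ∀ (i : Int) (labels : List String) (starts ends : List Int) (last : String),
    pvALoop xs bg i labels starts ends last =
      (labels ++ (pvPend xs bg last i).1,
       starts ++ (pvPend xs bg last i).2.1,
       ends ++ (pvPend xs bg last i).2.2.1,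
       (pvPend xs bg last i).2.2.2) := by
  induction xs with
  | nil => intro i labels starts ends last; simp [pvALoop, pvPend]
  | cons x rest ih =>
    intro i labels starts ends last
    by_cases hx : x = last
    · subst hx
      simp [pvALoop, pvPend, ih]
    · simp only [pvALoop, pvPend, if_pos hx, ne_eq]
      rw [ih]
      by_cases hbg : x ∈ bg <;> by_cases hlb : last ∈ bg <;>
        simp [hbg, hlb]

-- structural view of B's stage-1 comprehension: the marks after position 0
def pvMarksFrom : String → List String → Int → List (Int × String)
  | _, [], _ => []
  | prev, x :: rest, i =>
    if x ≠ prev then (i, x) :: pvMarksFrom x rest (i + 1)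
    else pvMarksFrom prev rest (i + 1)

-- the filtered-range comprehension over indices ≥ pre.length + 1 is pvMarksFrom
theorem pvMarks_gen (xs : List String) :
    ∀ (pre : List String) (prev : String) (fw : List String), fw = pre ++ prev :: xs →
    ((PySem.List.pyRange ((pre.length : Int) + 1) (fw.length : Int) 1).filter
        (fun i => i == 0 || !(PySem.List.pyGetD fw i "" == PySem.List.pyGetD fw (i - 1) ""))).map
      (fun i => (i, PySem.List.pyGetD fw i "")) = pvMarksFrom prev xs ((pre.length : Int) + 1) := by
  induction xs with
  | nil =>
    intro pre prev fw hfw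
    have hlen : (fw.length : Int) ≤ (pre.length : Int) + 1 := by
      subst hfw; simp
    rw [PySem.List.pyRange_one_eq_nil hlen]
    simp [pvMarksFrom]
  | cons x rest ih =>
    intro pre prev fw hfw
    have hlen : (pre.length : Int) + 1 < (fw.length : Int) := by
      subst hfw; simp
    rw [PySem.List.pyRange_one_cons hlen]
    have hcast : (pre.length : Int) + 1 = ((pre.length + 1 : Nat) : Int) := by push_cast; ring
    have hget1 : PySem.List.pyGetD fw ((pre.length : Int) + 1) "" = x := by
      rw [hcast, PySem.List.pyGetD_natCast, hfw]
      simp [List.getD]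
    have hget0 : PySem.List.pyGetD fw ((pre.length : Int) + 1 - 1) "" = prev := by
      have : (pre.length : Int) + 1 - 1 = ((pre.length : Nat) : Int) := by ring
      rw [this, PySem.List.pyGetD_natCast, hfw]
      simp [List.getD]
    have h0 : (((pre.length : Int) + 1) == 0) = false := by
      rw [beq_eq_false_iff_ne]; omega
    have hfw' : fw = (pre ++ [prev]) ++ x :: rest := by
      subst hfw; simp
    have ihx := ih (pre ++ [prev]) x fw hfw'
    have hlen' : ((pre ++ [prev]).length : Int) + 1 = (pre.length : Int) + 1 + 1 := by
      push_cast [List.length_append, List.length_cons]; simp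
    rw [hlen'] at ihx
    by_cases hxp : x = prev
    · subst hxp
      simp only [List.filter_cons, hget1, hget0, h0, beq_self_eq_true, Bool.not_true,
        Bool.false_or, Bool.false_eq_true, if_false, pvMarksFrom, ne_eq,
        not_true_eq_false, ihx]
    · have hbne : (x == prev) = false := by rw [beq_eq_false_iff_ne]; exact hxp
      simp only [List.filter_cons, hget1, hget0, h0, hbne, Bool.not_false, Bool.false_or,
        List.map_cons, pvMarksFrom, ne_eq, hxp, not_false_eq_true, if_pos, ihx]

theorem pvMarks_cons (f : String) (rest : List String) :
    pvMarks (f :: rest) = (0, f) :: pvMarksFrom f rest 1 := by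
  unfold pvMarks
  have hlen : (0 : Int) < ((f :: rest).length : Int) := by simp
  rw [PySem.List.pyRange_one_cons hlen]
  have h0 : PySem.List.pyGetD (f :: rest) 0 "" = f := PySem.List.pyGetD_zero_cons _ _ _
  simp only [List.filter_cons, beq_self_eq_true, Bool.true_or, if_true,
    List.map_cons, h0]
  have hg := pvMarks_gen rest [] f (f :: rest) (by simp)
  simp only [List.length_nil, Nat.cast_zero, zero_add] at hg
  simp only [zero_add, hg]

-- the crux: B's zip-and-emit over the marks equals the pending-run view of A
theorem pvEmitMarks_eq_pend (xs : List String) :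
    ∀ (bg : List String) (last : String) (i s : Int),
    pvEmitMarks bg (((s, last) :: pvMarksFrom last xs (i + 1)).zip
        ((pvMarksFrom last xs (i + 1)).map (fun p => p.1 - 1) ++
          [i + 1 + (xs.length : Int) - 1])) =
      (((if last ∈ bg then [] else [last]) ++ (pvPend xs bg last (i + 1)).1).map
          (fun t => (PySem.Int.ofStr? t).getD 0 - 1),
       (if last ∈ bg then [] else [s]) ++ (pvPend xs bg last (i + 1)).2.1,
       (pvPend xs bg last (i + 1)).2.2.1 ++
         (if (pvPend xs bg last (i + 1)).2.2.2 ∈ bg then []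
          else [i + 1 + (xs.length : Int) - 1])) := by
  induction xs with
  | nil =>
    intro bg last i s
    simp only [pvMarksFrom, pvPend, List.map_nil, List.nil_append, List.zip_cons_cons,
      List.zip_nil_right, pvEmitMarks, List.length_nil, Nat.cast_zero]
    by_cases hlb : last ∈ bg <;> simp [hlb]
  | cons x rest ih =>
    intro bg last i s
    have hlc : ((x :: rest).length : Int) = (rest.length : Int) + 1 := by push_cast [List.length_cons]; ring
    by_cases hxp : x = last
    · subst hxp
      have hm : pvMarksFrom x (x :: rest) (i + 1) = pvMarksFrom x rest (i + 1 + 1) := by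
        simp [pvMarksFrom]
      have hp : pvPend (x :: rest) bg x (i + 1) = pvPend rest bg x (i + 1 + 1) := by
        simp [pvPend]
      have hfin : i + 1 + ((x :: rest).length : Int) - 1 = i + 1 + 1 + (rest.length : Int) - 1 := by
        rw [hlc]; ring
      rw [hm, hp, hfin]
      exact ih bg x (i + 1) s
    · have hm : pvMarksFrom last (x :: rest) (i + 1)
          = (i + 1, x) :: pvMarksFrom x rest (i + 1 + 1) := by
        simp [pvMarksFrom, hxp]
      have hp : pvPend (x :: rest) bg last (i + 1) =
          (let r := pvPend rest bg x (i + 1 + 1)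
           ((if x ∈ bg then r.1 else x :: r.1),
            (if x ∈ bg then r.2.1 else (i + 1) :: r.2.1),
            (if last ∈ bg then r.2.2.1 else (i + 1 - 1) :: r.2.2.1),
            r.2.2.2)) := by
        simp [pvPend, hxp]
      have hfin : i + 1 + ((x :: rest).length : Int) - 1 = i + 1 + 1 + (rest.length : Int) - 1 := by
        rw [hlc]; ring
      rw [hm, hp, hfin]
      simp only [List.map_cons, List.cons_append, List.zip_cons_cons, pvEmitMarks]
      rw [ih bg x (i + 1) (i + 1)]
      by_cases hbg : x ∈ bg <;> by_cases hlb : last ∈ bg <;>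
        simp [hbg, hlb, List.append_assoc]

-- ===== VERDICT (by name: the statement is the Claim_ definition above) =====
theorem generate_labels_start_end_time_spec : Claim_equal_generate_labels_start_end_time := by
  intro fw bg _hdom hpre
  unfold Spec_generate_labels_start_end_time
  obtain ⟨hne, _⟩ := hpre
  cases fw with
  | nil => exact absurd rfl hne
  | cons f rest =>
    show generate_labels_start_end_time (f :: rest) bg
        = generate_labels_start_end_time_alt (f :: rest) bg
    unfold generate_labels_start_end_time generate_labels_start_end_time_alt
    rw [pvMarks_cons]
    have hE := pvEmitMarks_eq_pend rest bg f 0 0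
    simp only [zero_add] at hE
    simp only [ne_eq, reduceCtorEq, not_false_eq_true, if_pos,
      PySem.List.slice_from_one, List.tail_cons, List.headD_cons, pvALoop_eq_pend]
    have hn : ((f :: rest).length : Int) - 1 = 1 + (rest.length : Int) - 1 := by
      push_cast [List.length_cons]; ring
    rw [hn, hE]
    have hp : pvPend (f :: rest) bg f 0 = pvPend rest bg f 1 := by
      simp [pvPend]
    by_cases hfin : (pvPend rest bg f 1).2.2.2 ∈ bg <;>
      by_cases hf : f ∈ bg <;>
        simp [hp, hfin, hf]
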